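-- pv_equiv track=rewrite | github.com/developeryesgames/nuvie-korean | tools/add_fmtowns_variants.py | find_dos_translation
-- ===== SOURCE A (Python) =====
-- def normalize_for_lookup(text):
--     """lookup용 정규화"""
--     # @ 제거
--     text = text.replace('@', '')
--     # 줄바꿈 정리
--     text = text.replace('\\n', '\n')
--     # 공백 정규화
--     text = ' '.join(text.split())
--     return text.strip()
--
-- def find_dos_translation(npc_num, dos_text, dos_translations):
--     """DOS 번역 찾기"""
--     npc_trans = dos_translations.get(npc_num, {})
--
--     # 정확히 일치
--     if dos_text in npc_trans:
--         return npc_trans[dos_text]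
--
--     # 정규화해서 찾기
--     dos_norm = normalize_for_lookup(dos_text)
--     for eng, kor in npc_trans.items():
--         if normalize_for_lookup(eng) == dos_norm:
--             return kor
--
--     # 부분 일치 (DOS 텍스트가 일부만 있는 경우)
--     for eng, kor in npc_trans.items():
--         eng_norm = normalize_for_lookup(eng)
--         if dos_norm in eng_norm or eng_norm in dos_norm:
--             return kor
--
--     return None
-- ===== SOURCE B (Python) =====
-- def normalize_for_lookup(text):
--     text = text.replace('@', '')
--     text = text.replace('\\n', '\n')
--     text = ' '.join(text.split())
--     return text.strip()
--
-- def find_dos_translation(npc_num, dos_text, dos_translations):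
--     npc_trans = dos_translations.get(npc_num, {})
--     dos_norm = normalize_for_lookup(dos_text)
--     norm_hit = None
--     sub_hit = None
--     for eng, kor in npc_trans.items():
--         if eng == dos_text:
--             return kor  # exact match: highest priority, unique key
--         eng_norm = normalize_for_lookup(eng)
--         if norm_hit is None and eng_norm == dos_norm:
--             norm_hit = kor
--         elif sub_hit is None and (dos_norm in eng_norm or eng_norm in dos_norm):
--             sub_hit = kor
--     return norm_hit if norm_hit is not None else sub_hit
-- ===== Notes on version B (the rewrite author's own statement) =====
-- stated objective: alternative
-- what changed: Fused A's three separate scans (exact membership, normalized scan, substring scan) into one priority-tracking pass that normalizes each key once, early-returning only on the exact match and recording the first normalized and first substring hits.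
import Mathlib
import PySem

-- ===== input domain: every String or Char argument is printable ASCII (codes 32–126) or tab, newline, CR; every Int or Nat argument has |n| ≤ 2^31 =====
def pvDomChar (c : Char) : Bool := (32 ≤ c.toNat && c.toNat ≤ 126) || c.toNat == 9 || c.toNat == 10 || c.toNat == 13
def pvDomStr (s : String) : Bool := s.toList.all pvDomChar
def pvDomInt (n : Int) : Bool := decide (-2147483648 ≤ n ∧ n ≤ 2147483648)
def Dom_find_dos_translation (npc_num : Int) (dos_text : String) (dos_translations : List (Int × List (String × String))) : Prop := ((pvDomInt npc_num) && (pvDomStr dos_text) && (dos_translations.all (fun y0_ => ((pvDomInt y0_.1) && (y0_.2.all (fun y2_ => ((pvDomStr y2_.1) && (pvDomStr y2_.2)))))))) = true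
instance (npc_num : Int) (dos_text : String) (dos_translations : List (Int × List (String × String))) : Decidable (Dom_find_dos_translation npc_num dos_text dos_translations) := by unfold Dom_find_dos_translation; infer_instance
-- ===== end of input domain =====

-- B fuses A's three scans (exact membership, normalized scan, substring scan) into one
-- priority-tracking pass that normalizes each key once (objective: alternative decomposition).

-- ===== PORT A =====
-- shared module-level helper normalize_for_lookup
def normalize_for_lookup (text : String) : String :=
  let t1 := PySem.Str.replace text "@" ""
  let t2 := PySem.Str.replace t1 "\\n" "\n"
  let t3 := PySem.Str.join " " (PySem.Str.split₀ t2)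
  PySem.Str.strip t3

def find_dos_translation (npc_num : Int) (dos_text : String) (dos_translations : List (Int × List (String × String))) : Option String :=
  let npc_trans := (PySem.Dict.mk dos_translations).getD npc_num []
  let d := PySem.Dict.mk npc_trans
  if d.contains dos_text then d.get? dos_text
  else
    let dos_norm := normalize_for_lookup dos_text
    -- for eng, kor in npc_trans.items(): if normalize_for_lookup(eng) == dos_norm: return kor
    match npc_trans.find? (fun p => normalize_for_lookup p.1 == dos_norm) with
    | some p => some p.2
    | none =>
      -- for eng, kor in npc_trans.items(): eng_norm = …; if dos_norm in eng_norm or eng_norm in dos_norm: return kor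
      match npc_trans.find? (fun p =>
          let eng_norm := normalize_for_lookup p.1
          PySem.Str.isIn dos_norm eng_norm || PySem.Str.isIn eng_norm dos_norm) with
      | some p => some p.2
      | none => none

-- ===== PORT B =====
-- the single pass: early return on exact, record first normalized hit and first substring hit
def find_dos_loop (dos_text dos_norm : String) :
    List (String × String) → Option String → Option String → Option String
  | [], norm_hit, sub_hit => if norm_hit.isSome then norm_hit else sub_hit
  | (eng, kor) :: rest, norm_hit, sub_hit =>
    if eng == dos_text then some kor
    else
      let eng_norm := normalize_for_lookup eng
      if norm_hit.isNone && (eng_norm == dos_norm) then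
        find_dos_loop dos_text dos_norm rest (some kor) sub_hit
      else if sub_hit.isNone && (PySem.Str.isIn dos_norm eng_norm || PySem.Str.isIn eng_norm dos_norm) then
        find_dos_loop dos_text dos_norm rest norm_hit (some kor)
      else
        find_dos_loop dos_text dos_norm rest norm_hit sub_hit

def find_dos_translation_alt (npc_num : Int) (dos_text : String) (dos_translations : List (Int × List (String × String))) : Option String :=
  let npc_trans := (PySem.Dict.mk dos_translations).getD npc_num []
  let dos_norm := normalize_for_lookup dos_text
  find_dos_loop dos_text dos_norm npc_trans none none

-- ===== PRECONDITION & SPEC =====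
def Spec_find_dos_translation (npc_num : Int) (dos_text : String) (dos_translations : List (Int × List (String × String))) (out : Option String) : Prop := out = find_dos_translation_alt npc_num dos_text dos_translations
instance (npc_num : Int) (dos_text : String) (dos_translations : List (Int × List (String × String))) (out : Option String) : Decidable (Spec_find_dos_translation npc_num dos_text dos_translations out) := by unfold Spec_find_dos_translation; infer_instance

-- ===== CLAIM (what is proved, stated in full; the proofs are below) =====
def Claim_equal_find_dos_translation : Prop := ∀ (npc_num : Int) (dos_text : String) (dos_translations : List (Int × List (String × String))), Dom_find_dos_translation npc_num dos_text dos_translations → Spec_find_dos_translation npc_num dos_text dos_translations (find_dos_translation npc_num dos_text dos_translations)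

-- ===== LEMMAS AND PROOFS =====

-- first-match components of A's phases, over the raw item list
def pvExact (l : List (String × String)) (dt : String) : Option String :=
  (l.find? (fun p => p.1 == dt)).map (·.2)
def pvNorm (l : List (String × String)) (dn : String) : Option String :=
  (l.find? (fun p => normalize_for_lookup p.1 == dn)).map (·.2)
def pvSub (l : List (String × String)) (dn : String) : Option String :=
  (l.find? (fun p =>
    let en := normalize_for_lookup p.1
    PySem.Str.isIn dn en || PySem.Str.isIn en dn)).map (·.2)

theorem dict_get?_eq_find? (l : List (String × String)) (dt : String) :
    (PySem.Dict.mk l).get? dt = (l.find? (fun p => p.1 == dt)).map (·.2) := by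
  induction l with
  | nil => rfl
  | cons p rest ih =>
    obtain ⟨k, v⟩ := p
    rw [PySem.Dict.get?_mk_cons, List.find?_cons]
    by_cases h : k == dt
    · simp [h]
    · simp [h, ih]

theorem pvNorm_sub_isIn {en dn : String} (h : en == dn) :
    (PySem.Str.isIn dn en || PySem.Str.isIn en dn) = true := by
  have : en = dn := by simpa using h
  subst this
  simp [PySem.Str.isIn_eq, PySem.Chars.isIn_iff_infix]

theorem find_dos_loop_eq (dt dn : String) (l : List (String × String))
    (nh sh : Option String) :
    find_dos_loop dt dn l nh sh =
      match pvExact l dt with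
      | some v => some v
      | none =>
        match nh.or (pvNorm l dn) with
        | some v => some v
        | none => sh.or (pvSub l dn) := by
  induction l generalizing nh sh with
  | nil =>
    cases nh <;> cases sh <;> simp [find_dos_loop, pvExact, pvNorm, pvSub]
  | cons p rest ih =>
    obtain ⟨eng, kor⟩ := p
    by_cases hx : eng == dt
    · simp [find_dos_loop, hx, pvExact]
    · by_cases hn : normalize_for_lookup eng == dn
      · cases nh with
        | none =>
          simp only [find_dos_loop, hx, Bool.false_eq_true, if_neg, not_false_eq_true,
            Option.isNone_none, hn, Bool.and_self, if_pos, ih]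
          simp [pvExact, pvNorm, hx, hn]
        | some v =>
          have hs : (PySem.Str.isIn dn (normalize_for_lookup eng) ||
              PySem.Str.isIn (normalize_for_lookup eng) dn) = true := pvNorm_sub_isIn hn
          cases sh with
          | none =>
            simp only [find_dos_loop, hx, Bool.false_eq_true, if_neg, not_false_eq_true,
              Option.isNone_some, Bool.false_and, Option.isNone_none, hs, Bool.and_self,
              if_pos, ih]
            simp [pvExact, pvNorm, hx, hn]
          | some w =>
            simp only [find_dos_loop, hx, Bool.false_eq_true, if_neg, not_false_eq_true,
              Option.isNone_some, Bool.false_and, ih]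
            simp [pvExact, pvNorm, hx, hn]
      · by_cases hs : (PySem.Str.isIn dn (normalize_for_lookup eng) ||
            PySem.Str.isIn (normalize_for_lookup eng) dn) = true
        · cases sh with
          | none =>
            simp only [find_dos_loop, hx, Bool.false_eq_true, if_neg, not_false_eq_true,
              hn, Bool.and_false, Option.isNone_none, hs, Bool.and_self, if_pos, ih]
            simp only [PySem.Str.isIn_eq] at hs
            cases nh <;> simp [pvExact, pvNorm, pvSub, hx, hn, hs]
          | some w =>
            simp only [find_dos_loop, hx, Bool.false_eq_true, if_neg, not_false_eq_true,
              hn, Bool.and_false, Option.isNone_some, Bool.false_and, ih]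
            simp only [PySem.Str.isIn_eq] at hs
            cases nh <;> simp [pvExact, pvNorm, pvSub, hx, hn, hs]
        · simp only [find_dos_loop, hx, Bool.false_eq_true, if_neg, not_false_eq_true,
            hn, Bool.and_false, hs, Bool.and_false, ih]
          simp only [PySem.Str.isIn_eq] at hs
          cases nh <;> cases sh <;> simp [pvExact, pvNorm, pvSub, hx, hn, hs]

-- ===== VERDICT (by name: the statement is the Claim_ definition above) =====
theorem find_dos_translation_spec : Claim_equal_find_dos_translation := by
  intro npc_num dos_text dos_translations _
  unfold Spec_find_dos_translation
  simp only [find_dos_translation, find_dos_translation_alt]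
  generalize (PySem.Dict.mk dos_translations).getD npc_num [] = l
  rw [find_dos_loop_eq]
  rw [PySem.Dict.contains_eq_isSome_get?, dict_get?_eq_find?]
  by_cases hx : (l.find? (fun p => p.1 == dos_text)).isSome
  · obtain ⟨p, hp⟩ := Option.isSome_iff_exists.mp hx
    simp [hp, pvExact]
  · have hx' : l.find? (fun p => p.1 == dos_text) = none := by
      cases h : l.find? (fun p => p.1 == dos_text) <;> simp_all
    simp only [hx', Option.isSome_none, Bool.false_eq_true, if_neg, not_false_eq_true,
      pvExact, pvNorm, pvSub, Option.map_none, Option.none_or]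
    cases hn : l.find? (fun p => normalize_for_lookup p.1 == normalize_for_lookup dos_text) with
    | some p => simp
    | none =>
      simp only [Option.map_none]
      cases hs : l.find? (fun p =>
          let en := normalize_for_lookup p.1
          PySem.Str.isIn (normalize_for_lookup dos_text) en ||
            PySem.Str.isIn en (normalize_for_lookup dos_text)) <;> simp
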